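-- pv_equiv track=rewrite | github.com/pypi-data/pypi-mirror-336 | packages/django-pluralize-ru/django_pluralize_ru-0.1.2-py3-none-any.whl/django_pluralize_ru/templatetags/pluralize_ru.py | pluralize_ru
-- ===== SOURCE A (Python) =====
-- def pluralize_ru(value, forms):
--     """
--     Склонение русских слов после числительных.
--     Формат: "минута,минуты,минут"
--     """
--     try:
--         number = abs(int(value))
--         forms = [f.strip() for f in forms.split(",")]
--
--         if len(forms) != 3:
--             return ""
--
--         # Обрабатываем особые случаи для чисел от 11 до 19
--         if 11 <= number % 100 <= 19:
--             return forms[2]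
--
--         # Получаем последнюю цифру для склонения
--         last_digit = number % 10
--
--         if last_digit == 1:
--             return forms[0]
--         elif 2 <= last_digit <= 4:
--             return forms[1]
--         elif last_digit == 0 or 5 <= last_digit <= 9:
--             return forms[2]
--
--         # Обрабатываем случаи для чисел типа 21, 31, 41, и так далее
--         # Например, 21 комментарий, 31 комментарий
--         if number % 10 == 1 and (number % 100 != 11):
--             return forms[0]
--
--         # Для чисел, оканчивающихся на 2, 3, 4, но не на 12, 13, 14 (например 22, 23, 24)
--         if 2 <= number % 10 <= 4 and not (11 <= number % 100 <= 14):
--             return forms[1]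
--
--         # Все остальные случаи для чисел >= 5
--         return forms[2]
--
--     except (ValueError, TypeError):
--         return ""
-- ===== SOURCE B (Python) =====
-- # Plural form index for every residue mod 100, precomputed into one 100-char table:
-- # no conditionals on the number at all.
-- TABLE = "2011122222" + "2222222222" + "2011122222" * 8
--
-- def pluralize_ru(value, forms):
--     try:
--         words = [f.strip() for f in forms.split(",")]
--         if len(words) != 3:
--             return ""
--         return words[int(TABLE[abs(int(value)) % 100])]
--     except (ValueError, TypeError):
--         return ""
-- ===== Notes on version B (the rewrite author's own statement) =====
-- stated objective: alternative
-- what changed: B precomputes the plural-form index for every residue mod 100 into one 100-char table and replaces all of A's conditionals on the number (teens check plus last-digit cascade) by a single unconditional lookup TABLE[abs(n)%100].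
import Mathlib
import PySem

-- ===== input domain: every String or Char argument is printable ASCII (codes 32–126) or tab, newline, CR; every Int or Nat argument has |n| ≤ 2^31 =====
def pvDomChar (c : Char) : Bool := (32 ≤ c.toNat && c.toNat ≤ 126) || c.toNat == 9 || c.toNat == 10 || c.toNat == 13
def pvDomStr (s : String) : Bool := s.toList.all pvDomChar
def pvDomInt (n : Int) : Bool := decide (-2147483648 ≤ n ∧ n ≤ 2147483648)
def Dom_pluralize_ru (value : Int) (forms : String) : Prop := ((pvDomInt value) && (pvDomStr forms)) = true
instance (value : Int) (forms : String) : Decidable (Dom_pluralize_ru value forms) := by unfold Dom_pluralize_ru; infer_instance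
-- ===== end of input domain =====

-- B replaces all of A's conditionals on the number by one lookup in a precomputed
-- 100-entry table keyed on abs(n) % 100 (alternative decomposition; same cost).

-- ===== PORT A =====
-- value is already an int, so int(value) and the try/except never raise: the function is total.
def pluralize_ru (value : Int) (forms : String) : String :=
  let number : Int := |value|
  let fs : List String := ((PySem.Str.split? forms ",").getD []).map PySem.Str.strip
  if fs.length ≠ 3 then ""
  else if 11 ≤ PySem.Int.mod number 100 ∧ PySem.Int.mod number 100 ≤ 19 then
    (PySem.List.pyGet? fs 2).getD ""   -- in range: len = 3
  else
    let last_digit := PySem.Int.mod number 10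
    if last_digit = 1 then (PySem.List.pyGet? fs 0).getD ""
    else if 2 ≤ last_digit ∧ last_digit ≤ 4 then (PySem.List.pyGet? fs 1).getD ""
    else if last_digit = 0 ∨ (5 ≤ last_digit ∧ last_digit ≤ 9) then (PySem.List.pyGet? fs 2).getD ""
    else if PySem.Int.mod number 10 = 1 ∧ PySem.Int.mod number 100 ≠ 11 then (PySem.List.pyGet? fs 0).getD ""
    else if (2 ≤ PySem.Int.mod number 10 ∧ PySem.Int.mod number 10 ≤ 4)
            ∧ ¬ (11 ≤ PySem.Int.mod number 100 ∧ PySem.Int.mod number 100 ≤ 14) then (PySem.List.pyGet? fs 1).getD ""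
    else (PySem.List.pyGet? fs 2).getD ""

-- ===== PORT B =====
-- Source B's TABLE = "2011122222" + "2222222222" + "2011122222" * 8, written out:
def pvTable : String :=
  "2011122222222222222220111222222011122222201112222220111222222011122222201112222220111222222011122222"

def pluralize_ru_alt (value : Int) (forms : String) : String :=
  let words : List String := ((PySem.Str.split? forms ",").getD []).map PySem.Str.strip
  if words.length ≠ 3 then ""
  else
    -- int(TABLE[abs(int(value)) % 100]): the index is in range and the char is a digit,
    -- so neither option is ever none
    let idx : Int :=
      ((PySem.Str.pyGet? pvTable (PySem.Int.mod |value| 100)).bind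
        (fun c => PySem.Int.ofChars? [c])).getD 0
    (PySem.List.pyGet? words idx).getD ""   -- in range: idx ∈ {0,1,2}, len = 3

-- ===== PRECONDITION & SPEC =====
def Spec_pluralize_ru (value : Int) (forms : String) (out : String) : Prop := out = pluralize_ru_alt value forms
instance (value : Int) (forms : String) (out : String) : Decidable (Spec_pluralize_ru value forms out) := by unfold Spec_pluralize_ru; infer_instance

-- ===== CLAIM (what is proved, stated in full; the proofs are below) =====
def Claim_equal_pluralize_ru : Prop := ∀ (value : Int) (forms : String), Dom_pluralize_ru value forms → Spec_pluralize_ru value forms (pluralize_ru value forms)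

-- ===== LEMMAS AND PROOFS =====

-- A's branch cascade, as a function of the residue mod 100, agrees with the table digit.
theorem idx_eq (m : Int) (h0 : 0 ≤ m) (h9 : m < 100) :
    (if 11 ≤ m ∧ m ≤ 19 then (2 : Int)
     else if m % 10 = 1 then 0
     else if 2 ≤ m % 10 ∧ m % 10 ≤ 4 then 1
     else 2)
    = ((PySem.Str.pyGet? pvTable m).bind (fun c => PySem.Int.ofChars? [c])).getD 0 := by
  interval_cases m <;> decide

-- ===== VERDICT (by name: the statement is the Claim_ definition above) =====
theorem pluralize_ru_spec : Claim_equal_pluralize_ru := by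
  intro value forms _
  unfold Spec_pluralize_ru pluralize_ru pluralize_ru_alt
  set number : Int := |value| with hn
  set fs : List String := ((PySem.Str.split? forms ",").getD []).map PySem.Str.strip with hfs
  by_cases h3 : fs.length ≠ 3
  · rw [if_pos h3, if_pos h3]
  · rw [if_neg h3, if_neg h3]
    simp only [PySem.Int.mod_eq_emod_of_pos (show (0:Int) < 100 by norm_num),
               PySem.Int.mod_eq_emod_of_pos (show (0:Int) < 10 by norm_num)]
    have hm0 : 0 ≤ number % 100 := Int.emod_nonneg _ (by norm_num)
    have hm9 : number % 100 < 100 := Int.emod_lt_of_pos _ (by norm_num)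
    have hd : number % 10 = (number % 100) % 10 := by omega
    rw [← idx_eq (number % 100) hm0 hm9]
    by_cases h11 : 11 ≤ number % 100 ∧ number % 100 ≤ 19
    · rw [if_pos h11, if_pos h11]
    · rw [if_neg h11, if_neg h11]
      by_cases h1 : number % 10 = 1
      · rw [if_pos h1, if_pos (by omega : (number % 100) % 10 = 1)]
      by_cases h24 : 2 ≤ number % 10 ∧ number % 10 ≤ 4
      · rw [if_neg h1, if_pos h24, if_neg (by omega : ¬ (number % 100) % 10 = 1),
            if_pos (by omega : 2 ≤ (number % 100) % 10 ∧ (number % 100) % 10 ≤ 4)]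
      · have h59 : number % 10 = 0 ∨ (5 ≤ number % 10 ∧ number % 10 ≤ 9) := by omega
        rw [if_neg h1, if_neg h24, if_pos h59, if_neg (by omega : ¬ (number % 100) % 10 = 1),
            if_neg (by omega : ¬ (2 ≤ (number % 100) % 10 ∧ (number % 100) % 10 ≤ 4))]
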